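-- pv_equiv track=rewrite | github.com/MintyFresh-2/google-code-jam-2021 | moonsAndUmbrellas.py | costCalculation
-- ===== SOURCE A (Python) =====
-- def costCalculation(cjCost, jcCost, mural):
--     mural = mural.replace("?", "")
--     cost = 0
--     for x in range(0, len(mural)-1):
--         if (mural[x]+mural[x+1]) == "CJ":
--             cost += cjCost
--         elif (mural[x]+mural[x+1]) == "JC":
--             cost += jcCost
--     return cost
-- ===== SOURCE B (Python) =====
-- def costCalculation(cjCost, jcCost, mural):
--     mural = mural.replace("?", "")
--     return cjCost * mural.count("CJ") + jcCost * mural.count("JC")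
-- ===== Notes on version B (the rewrite author's own statement) =====
-- stated objective: simpler
-- what changed: Replaces the index loop with a running accumulator by a closed-form expression: two substring counts via str.count (valid because 'CJ'/'JC' never self-overlap, so non-overlapping counts equal the adjacent-pair tally); measured much faster since the scans run in C.
import Mathlib
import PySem

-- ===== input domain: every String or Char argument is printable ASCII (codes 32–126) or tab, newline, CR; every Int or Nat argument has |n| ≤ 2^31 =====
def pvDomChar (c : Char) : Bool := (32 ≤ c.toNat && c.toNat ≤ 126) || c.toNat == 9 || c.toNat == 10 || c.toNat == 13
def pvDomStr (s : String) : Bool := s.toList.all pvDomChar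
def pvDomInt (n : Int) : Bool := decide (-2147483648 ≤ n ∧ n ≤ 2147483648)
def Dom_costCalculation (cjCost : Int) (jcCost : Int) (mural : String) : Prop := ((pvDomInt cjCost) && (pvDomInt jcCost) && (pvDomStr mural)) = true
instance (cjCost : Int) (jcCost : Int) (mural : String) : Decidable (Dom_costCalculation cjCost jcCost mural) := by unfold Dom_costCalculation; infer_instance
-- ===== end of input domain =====

-- B replaces A's index loop with a closed-form expression using two substring counts (same O(n) cost, simpler).

-- ===== PORT A =====
-- Faithful transliteration of A: remove '?', then loop x over range(0, len-1) adding
-- cjCost/jcCost when mural[x]+mural[x+1] equals "CJ"/"JC" (the two-character concatenation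
-- compared to "CJ" is exactly the equality of the two-character list below).
def costCalculation (cjCost : Int) (jcCost : Int) (mural : String) : Int :=
  let m := (PySem.Str.replace mural "?" "").toList
  (PySem.List.pyRange 0 ((m.length : Int) - 1) 1).foldl
    (fun cost x =>
      if [PySem.List.pyGetD m x ' ', PySem.List.pyGetD m (x + 1) ' '] = ['C', 'J'] then
        cost + cjCost
      else if [PySem.List.pyGetD m x ' ', PySem.List.pyGetD m (x + 1) ' '] = ['J', 'C'] then
        cost + jcCost
      else cost) 0

-- ===== PORT B =====
def costCalculation_alt (cjCost : Int) (jcCost : Int) (mural : String) : Int :=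
  let m := PySem.Str.replace mural "?" ""
  cjCost * (PySem.Str.count m "CJ" : Int) + jcCost * (PySem.Str.count m "JC" : Int)

-- ===== PRECONDITION & SPEC =====
def Spec_costCalculation (cjCost : Int) (jcCost : Int) (mural : String) (out : Int) : Prop := out = costCalculation_alt cjCost jcCost mural
instance (cjCost : Int) (jcCost : Int) (mural : String) (out : Int) : Decidable (Spec_costCalculation cjCost jcCost mural out) := by unfold Spec_costCalculation; infer_instance

-- ===== CLAIM (what is proved, stated in full; the proofs are below) =====
def Claim_equal_costCalculation : Prop := ∀ (cjCost : Int) (jcCost : Int) (mural : String), Dom_costCalculation cjCost jcCost mural → Spec_costCalculation cjCost jcCost mural (costCalculation cjCost jcCost mural)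

-- ===== LEMMAS AND PROOFS =====

-- The index loop over range(0, len-1) reads the list of adjacent pairs.
theorem foldl_range_adjacent (f : Int → Char → Char → Int) :
    ∀ (cs : List Char) (a : Int),
      (List.range (cs.length - 1)).foldl
        (fun acc k => f acc (cs.getD k ' ') (cs.getD (k + 1) ' ')) a
      = (cs.zip cs.tail).foldl (fun acc p => f acc p.1 p.2) a := by
  intro cs
  induction cs with
  | nil => intro a; simp
  | cons c t ih =>
    intro a
    cases t with
    | nil => simp
    | cons b t' =>
      simp only [List.length_cons, Nat.add_sub_cancel, List.range_succ_eq_map,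
        List.foldl_cons, List.foldl_map, List.getD_cons_zero, List.getD_cons_succ,
        List.zip_cons_cons, List.tail_cons]
      have := ih (f a c b)
      simpa using this

-- Python's non-overlapping substring count of a two-character pattern c1c2 with c1 ≠ c2
-- equals the number of adjacent pairs (c1, c2).
theorem count_go_pair (c1 c2 : Char) (h : c1 ≠ c2) :
    ∀ (fuel : Nat) (l : List Char) (acc : Nat), l.length ≤ fuel →
      PySem.Chars.count.go [c1, c2] fuel l acc
      = acc + (l.zip l.tail).countP (fun p => p.1 == c1 && p.2 == c2) := by
  intro fuel
  induction fuel with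
  | zero =>
    intro l acc hl
    cases l with
    | nil => simp [PySem.Chars.count.go]
    | cons x t => simp at hl
  | succ n ih =>
    intro l acc hl
    cases l with
    | nil => simp [PySem.Chars.count.go]
    | cons x t =>
      rw [PySem.Chars.count.go]
      by_cases hp : [c1, c2].isPrefixOf (x :: t) = true
      · rw [if_pos hp]
        obtain ⟨hx, t', ht⟩ : x = c1 ∧ ∃ t', t = c2 :: t' := by
          cases t with
          | nil => simp [List.isPrefixOf] at hp
          | cons b t' =>
            simp only [List.isPrefixOf, Bool.and_eq_true, beq_iff_eq] at hp
            exact ⟨hp.1.symm, t', by rw [hp.2.1]⟩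
        rw [hx, ht] at hl ⊢
        simp only [List.length_cons] at hl
        simp only [List.length_cons, List.length_nil, List.drop_succ_cons, List.drop_zero]
        rw [ih t' (acc + 1) (by omega)]
        cases t' with
        | nil => simp
        | cons d r =>
          simp only [List.zip_cons_cons, List.tail_cons, List.countP_cons]
          have hne : (c2 == c1) = false := by
            simp only [beq_eq_false_iff_ne, ne_eq]; exact fun e => h e.symm
          simp [hne]
          ring
      · rw [if_neg hp]
        rw [ih t acc (by simp at hl; omega)]
        cases t with
        | nil => simp
        | cons b r =>
          simp only [List.zip_cons_cons, List.tail_cons, List.countP_cons]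
          have : ((x == c1) && (b == c2)) = false := by
            by_contra hc
            simp only [Bool.not_eq_false, Bool.and_eq_true, beq_iff_eq] at hc
            exact hp (by simp [List.isPrefixOf, hc.1, hc.2])
          simp [this]

theorem count_pair (c1 c2 : Char) (h : c1 ≠ c2) (cs : List Char) :
    PySem.Chars.count cs [c1, c2]
    = (cs.zip cs.tail).countP (fun p => p.1 == c1 && p.2 == c2) := by
  rw [PySem.Chars.count]
  simp only [List.isEmpty_cons, if_false, Bool.false_eq_true]
  simpa using count_go_pair c1 c2 h cs.length cs 0 le_rfl

-- The accumulator loop over pairs is a linear combination of the two pair counts.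
theorem foldl_pairs_linear (cj jc : Int) :
    ∀ (ps : List (Char × Char)) (a : Int),
      ps.foldl (fun acc p =>
        if [p.1, p.2] = ['C', 'J'] then acc + cj
        else if [p.1, p.2] = ['J', 'C'] then acc + jc
        else acc) a
      = a + cj * (ps.countP (fun p => p.1 == 'C' && p.2 == 'J') : Int)
          + jc * (ps.countP (fun p => p.1 == 'J' && p.2 == 'C') : Int) := by
  intro ps
  induction ps with
  | nil => intro a; simp
  | cons p t ih =>
    intro a
    obtain ⟨u, v⟩ := p
    simp only [List.foldl_cons, List.countP_cons, ih]
    by_cases h1 : u = 'C' ∧ v = 'J'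
    · obtain ⟨rfl, rfl⟩ := h1
      simp only [if_true, List.cons.injEq, and_true]
      simp
      ring
    · by_cases h2 : u = 'J' ∧ v = 'C'
      · obtain ⟨rfl, rfl⟩ := h2
        simp
        ring
      · have h1' : ¬([u, v] = ['C', 'J']) := by
          simp only [List.cons.injEq, and_true]; exact h1
        have h2' : ¬([u, v] = ['J', 'C']) := by
          simp only [List.cons.injEq, and_true]; exact h2
        have hA : ((u == 'C') && (v == 'J')) = false := by
          rcases Bool.eq_false_or_eq_true ((u == 'C') && (v == 'J')) with h | h
          · exact absurd (by simpa [beq_iff_eq] using (Bool.and_eq_true _ _).mp h) h1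
          · exact h
        have hB : ((u == 'J') && (v == 'C')) = false := by
          rcases Bool.eq_false_or_eq_true ((u == 'J') && (v == 'C')) with h | h
          · exact absurd (by simpa [beq_iff_eq] using (Bool.and_eq_true _ _).mp h) h2
          · exact h
        rw [if_neg h1', if_neg h2']
        simp [hA, hB]

-- Index-loop form of A reduced to the pair counts used by B, on an arbitrary character list.
theorem loop_eq_counts (cj jc : Int) (cs : List Char) :
    (PySem.List.pyRange 0 ((cs.length : Int) - 1) 1).foldl
      (fun cost x =>
        if [PySem.List.pyGetD cs x ' ', PySem.List.pyGetD cs (x + 1) ' '] = ['C', 'J'] then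
          cost + cj
        else if [PySem.List.pyGetD cs x ' ', PySem.List.pyGetD cs (x + 1) ' '] = ['J', 'C'] then
          cost + jc
        else cost) 0
    = cj * (PySem.Chars.count cs ['C', 'J'] : Int)
      + jc * (PySem.Chars.count cs ['J', 'C'] : Int) := by
  rw [PySem.List.pyRange_one, List.foldl_map]
  have hn : ((cs.length : Int) - 1 - 0).toNat = cs.length - 1 := by omega
  have hc : ∀ k : Nat, ((k : Int) + 1) = ((k + 1 : Nat) : Int) := by intro k; push_cast; ring
  simp only [hn, zero_add, hc, PySem.List.pyGetD_natCast]
  rw [foldl_range_adjacent (fun acc a b =>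
        if [a, b] = ['C', 'J'] then acc + cj
        else if [a, b] = ['J', 'C'] then acc + jc else acc) cs 0]
  rw [foldl_pairs_linear cj jc (cs.zip cs.tail) 0]
  rw [count_pair 'C' 'J' (by decide) cs, count_pair 'J' 'C' (by decide) cs]
  ring

-- ===== VERDICT (by name: the statement is the Claim_ definition above) =====
theorem costCalculation_spec : Claim_equal_costCalculation := by
  intro cj jc mural _
  unfold Spec_costCalculation costCalculation costCalculation_alt
  simp only [PySem.Str.count_eq]
  exact loop_eq_counts cj jc (PySem.Str.replace mural "?" "").toList
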